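-- pv_equiv track=rewrite | github.com/andrewjleung/gtci | src/02-islands-matrix-traversal/ch03_cycle_in_matrix.py | cycle_in_matrix
-- ===== SOURCE A (Python) =====
-- DIRECTIONS = {
--     "u": (-1, 0, "d"),
--     "r": (0, 1, "l"),
--     "d": (1, 0, "u"),
--     "l": (0, -1, "r")
-- }
--
-- def dfs_visit_and_check_cycle(matrix, visited, row, col, char, direction_taken):
--     if row < 0 or row >= len(matrix):
--         return False
--     if col < 0 or col >= len(matrix[row]):
--         return False
--     if matrix[row][col] != char:
--         return False
--     if visited[row][col]:
--         return True
--
--     visited[row][col] = True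
--     has_cycle = False
--
--     for direction, (row_diff, col_diff, opposite) in DIRECTIONS.items():
--         if direction_taken != opposite:
--             has_cycle |= dfs_visit_and_check_cycle(
--                 matrix, visited, row + row_diff, col + col_diff, char, direction)
--
--     return has_cycle
--
-- def cycle_in_matrix(matrix):
--     """
--     Time Complexity:  O(m * n)
--     Space Complexity: O(m * n)
--     """
--     visited = [[False for _ in range(len(matrix[row]))]
--                for row in range(len(matrix))]
--
--     for row in range(len(matrix)):
--         for col in range(len(matrix[row])):
--             if not visited[row][col]:
--                 if dfs_visit_and_check_cycle(matrix, visited, row, col, matrix[row][col], "o"):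
--                     return True
--
--     return False
-- ===== SOURCE B (Python) =====
-- def cycle_in_matrix(matrix):
--     """Iterative DFS with an explicit stack and a visited set (no recursion)."""
--     visited = set()
--     for r in range(len(matrix)):
--         for c in range(len(matrix[r])):
--             if (r, c) in visited:
--                 continue
--             char = matrix[r][c]
--             stack = [(r, c, "o")]
--             while stack:
--                 row, col, came = stack.pop()
--                 if not (0 <= row < len(matrix)):
--                     continue
--                 if not (0 <= col < len(matrix[row])):
--                     continue
--                 if matrix[row][col] != char:
--                     continue
--                 if (row, col) in visited:
--                     return True
--                 visited.add((row, col))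
--                 # push in reverse of the u,r,d,l exploration order (stack is LIFO)
--                 for row_diff, col_diff, direction, opposite in (
--                         (0, -1, "l", "r"), (1, 0, "d", "u"),
--                         (0, 1, "r", "l"), (-1, 0, "u", "d")):
--                     if came != opposite:
--                         stack.append((row + row_diff, col + col_diff, direction))
--     return False
-- ===== Notes on version B (the rewrite author's own statement) =====
-- stated objective: alternative
-- what changed: Replaces the recursive DFS helper with an iterative explicit-stack DFS that keeps visited cells in a set of coordinates instead of a parallel boolean grid, and returns True immediately on the first revisit.
import Mathlib
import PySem

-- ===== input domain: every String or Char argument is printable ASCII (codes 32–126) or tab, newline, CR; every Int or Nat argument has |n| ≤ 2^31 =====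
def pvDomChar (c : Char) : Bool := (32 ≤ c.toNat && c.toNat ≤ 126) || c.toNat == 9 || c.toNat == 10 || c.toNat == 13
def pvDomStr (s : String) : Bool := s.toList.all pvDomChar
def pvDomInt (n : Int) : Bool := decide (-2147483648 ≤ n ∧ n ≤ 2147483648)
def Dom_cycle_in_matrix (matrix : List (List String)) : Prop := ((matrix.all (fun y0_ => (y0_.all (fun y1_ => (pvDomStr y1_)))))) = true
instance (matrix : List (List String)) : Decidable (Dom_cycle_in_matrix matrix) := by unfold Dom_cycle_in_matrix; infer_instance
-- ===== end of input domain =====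

-- B replaces A's recursive DFS with an iterative explicit-stack DFS over a visited set of
-- coordinates (same exploration order, no recursion); the return value is proved equal.

-- ===== PORT A =====
-- the DIRECTIONS dict, in Python iteration order: (name, (row_diff, col_diff, opposite))
def pvDirs : List (String × (Int × Int × String)) :=
  [("u", (-1, 0, "d")), ("r", (0, 1, "l")), ("d", (1, 0, "u")), ("l", (0, -1, "r"))]

-- visited[row][col]; the sign guard is vacuous at every use site (bounds are checked first)
def pvVget (v : List (List Bool)) (r c : Int) : Bool :=
  if 0 ≤ r ∧ 0 ≤ c then ((v.getD r.toNat []).getD c.toNat false) else false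
-- visited[row][col] = True
def pvVset (v : List (List Bool)) (r c : Int) : List (List Bool) :=
  v.modify r.toNat (fun row => row.set c.toNat true)

-- dfs_visit_and_check_cycle; the Nat fuel is only a totality guard (callers pass enough)
def dfsA (m : List (List String)) : Nat → List (List Bool) → Int → Int → String → String → List (List Bool) × Bool
  | 0, v, _, _, _, _ => (v, false)
  | fuel+1, v, row, col, ch, dt =>
    if row < 0 ∨ (m.length : Int) ≤ row then (v, false)
    else if col < 0 ∨ ((m.getD row.toNat []).length : Int) ≤ col then (v, false)
    else if ((m.getD row.toNat []).getD col.toNat "") ≠ ch then (v, false)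
    else if pvVget v row col then (v, true)
    else
      pvDirs.foldl (fun acc d =>
        if dt ≠ d.2.2.2 then
          let r := dfsA m fuel acc.1 (row + d.2.1) (col + d.2.2.1) ch d.1
          (r.1, acc.2 || r.2)
        else acc) (pvVset v row col, false)

def pvInitVisited (m : List (List String)) : List (List Bool) :=
  m.map (fun row => row.map (fun _ => false))

def pvSize (m : List (List String)) : Nat := (m.map List.length).sum

-- the inner 'for col in range(len(matrix[row]))' loop of A
def pvColsA (m : List (List String)) (row : Nat) : List (List Bool) → List Nat → List (List Bool) × Bool
  | v, [] => (v, false)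
  | v, c :: cs =>
    if !(pvVget v (row : Int) (c : Int)) then
      let p := dfsA m (pvSize m + 1) v (row : Int) (c : Int) ((m.getD row []).getD c "") "o"
      if p.2 then (p.1, true) else pvColsA m row p.1 cs
    else pvColsA m row v cs

-- the outer 'for row in range(len(matrix))' loop of A
def pvRowsA (m : List (List String)) : List (List Bool) → List Nat → List (List Bool) × Bool
  | v, [] => (v, false)
  | v, r :: rs =>
    let p := pvColsA m r v (List.range ((m.getD r []).length))
    if p.2 then (p.1, true) else pvRowsA m p.1 rs

def cycle_in_matrix (matrix : List (List String)) : Bool :=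
  (pvRowsA matrix (pvInitVisited matrix) (List.range matrix.length)).2

-- ===== PORT B =====
-- the neighbor tuple of Source B: (row_diff, col_diff, direction, opposite), reverse exploration order
def pvDirsRev : List (Int × Int × String × String) :=
  [(0, -1, "l", "r"), (1, 0, "d", "u"), (0, 1, "r", "l"), (-1, 0, "u", "d")]

-- the inner for-loop of Source B: push the allowed neighbor frames (stack top = list head)
def pvPush (row col : Int) (came : String) (st : List (Int × Int × String)) : List (Int × Int × String) :=
  pvDirsRev.foldl (fun st d =>
    if came ≠ d.2.2.2 then (row + d.1, col + d.2.1, d.2.2.1) :: st else st) st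

-- all in-range coordinates of the matrix (used only by pvStackB's termination measure)
def pvCells (m : List (List String)) : List (Int × Int) :=
  (List.range m.length).flatMap (fun r => (List.range ((m.getD r []).length)).map (fun c => (Int.ofNat r, Int.ofNat c)))

-- the next three lemmas justify pvStackB's termination measure (cited in decreasing_by)
theorem countP_lt {α : Type} (l : List α) (p q : α → Bool) (hpq : ∀ x, p x = true → q x = true)
    (a : α) (ha : a ∈ l) (hq : q a = true) (hp : p a = false) : l.countP p < l.countP q := by
  induction l with
  | nil => simp at ha
  | cons x l ih =>
    rcases List.mem_cons.1 ha with rfl | hmem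
    · have h1 := List.countP_le_length (p := p) (l := l)
      have h2 : l.countP p ≤ l.countP q := List.countP_mono_left (fun x hx => hpq x)
      simp [List.countP_cons, hp, hq]; omega
    · by_cases hx : p x = true
      · simp [List.countP_cons, hx, hpq x hx]; exact ih hmem
      · simp only [List.countP_cons]
        have := ih hmem
        cases hqx : q x <;> simp [hx, hqx] <;> omega

theorem mem_pvCells (m : List (List String)) (row col : Int)
    (h1 : ¬(row < 0 ∨ (m.length : Int) ≤ row))
    (h2 : ¬(col < 0 ∨ ((m.getD row.toNat []).length : Int) ≤ col)) :
    (row, col) ∈ pvCells m := by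
  simp only [not_or, not_lt, not_le] at h1 h2
  have hr : row.toNat < m.length := by omega
  have hc : col.toNat < (m.getD row.toNat []).length := by omega
  unfold pvCells
  refine List.mem_flatMap.2 ⟨row.toNat, List.mem_range.2 hr, ?_⟩
  have heq : (Int.ofNat row.toNat, Int.ofNat col.toNat) = (row, col) := by
    show ((row.toNat : Int), (col.toNat : Int)) = (row, col)
    rw [Int.toNat_of_nonneg (by omega), Int.toNat_of_nonneg (by omega)]
  rw [← heq]
  exact List.mem_map_of_mem (f := fun c : Nat => (Int.ofNat row.toNat, Int.ofNat c)) (List.mem_range.2 hc)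

theorem pvCountP_add_lt (m : List (List String)) (s : PySem.Set (Int × Int)) (row col : Int)
    (h1 : ¬(row < 0 ∨ (m.length : Int) ≤ row))
    (h2 : ¬(col < 0 ∨ ((m.getD row.toNat []).length : Int) ≤ col))
    (h3 : ¬ PySem.Set.contains s (row, col) = true) :
    (pvCells m).countP (fun p => ! PySem.Set.contains (PySem.Set.add s (row, col)) p)
      < (pvCells m).countP (fun p => ! PySem.Set.contains s p) := by
  have hcs : PySem.Set.contains s (row, col) = false := by
    cases h : PySem.Set.contains s (row, col)
    · rfl
    · exact absurd h h3
  refine countP_lt _ _ _ (fun x hx => ?_) (row, col) (mem_pvCells m row col h1 h2) (by rw [hcs]; rfl) ?_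
  · simp only [Bool.not_eq_true'] at hx ⊢
    rcases hcx : PySem.Set.contains s x with _ | _
    · rfl
    · exfalso
      have hmem : x ∈ s := (PySem.Set.contains_iff s x).1 hcx
      have : x ∈ PySem.Set.add s (row, col) := (PySem.Set.mem_add s _ x).2 (Or.inl hmem)
      rw [(PySem.Set.contains_iff _ x).2 this] at hx
      simp at hx
  · have hmem : (row, col) ∈ PySem.Set.add s (row, col) := (PySem.Set.mem_add s _ _).2 (Or.inr rfl)
    rw [(PySem.Set.contains_iff _ _).2 hmem]
    rfl

theorem pvPush_length (row col : Int) (came : String) (st : List (Int × Int × String)) :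
    (pvPush row col came st).length ≤ st.length + 4 := by
  simp only [pvPush, pvDirsRev, List.foldl]
  split_ifs <;> simp

-- the while-stack loop of Source B; `none` = "return True", `some s` = stack exhausted
def pvStackB (m : List (List String)) (ch : String) : PySem.Set (Int × Int) → List (Int × Int × String) → Option (PySem.Set (Int × Int))
  | s, [] => some s
  | s, (row, col, came) :: st =>
    if row < 0 ∨ (m.length : Int) ≤ row then pvStackB m ch s st
    else if col < 0 ∨ ((m.getD row.toNat []).length : Int) ≤ col then pvStackB m ch s st
    else if ((m.getD row.toNat []).getD col.toNat "") ≠ ch then pvStackB m ch s st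
    else if PySem.Set.contains s (row, col) then none
    else pvStackB m ch (PySem.Set.add s (row, col)) (pvPush row col came st)
  termination_by s st => st.length + 4 * ((pvCells m).countP (fun p => ! PySem.Set.contains s p))
  decreasing_by
  all_goals simp only [List.length_cons]
  all_goals first
    | omega
    | (have hl := pvPush_length row col came st
       have hc := pvCountP_add_lt m s row col (by assumption) (by assumption) (by assumption)
       omega)

def pvColsB (m : List (List String)) (row : Nat) : PySem.Set (Int × Int) → List Nat → PySem.Set (Int × Int) × Bool
  | s, [] => (s, false)
  | s, c :: cs =>
    if PySem.Set.contains s ((row : Int), (c : Int)) then pvColsB m row s cs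
    else
      match pvStackB m ((m.getD row []).getD c "") s [((row : Int), (c : Int), "o")] with
      | none => (s, true)
      | some s' => pvColsB m row s' cs

def pvRowsB (m : List (List String)) : PySem.Set (Int × Int) → List Nat → PySem.Set (Int × Int) × Bool
  | s, [] => (s, false)
  | s, r :: rs =>
    let p := pvColsB m r s (List.range ((m.getD r []).length))
    if p.2 then (p.1, true) else pvRowsB m p.1 rs

def cycle_in_matrix_alt (matrix : List (List String)) : Bool :=
  (pvRowsB matrix PySem.Set.empty (List.range matrix.length)).2

-- ===== PRECONDITION & SPEC =====
def Spec_cycle_in_matrix (matrix : List (List String)) (out : Bool) : Prop := out = cycle_in_matrix_alt matrix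
instance (matrix : List (List String)) (out : Bool) : Decidable (Spec_cycle_in_matrix matrix out) := by unfold Spec_cycle_in_matrix; infer_instance

-- ===== CLAIM (what is proved, stated in full; the proofs are below) =====
def Claim_equal_cycle_in_matrix : Prop := ∀ (matrix : List (List String)), Dom_cycle_in_matrix matrix → Spec_cycle_in_matrix matrix (cycle_in_matrix matrix)

-- ===== LEMMAS AND PROOFS =====

def pvShape (m : List (List String)) (v : List (List Bool)) : Prop :=
  v.length = m.length ∧ ∀ i, (v.getD i []).length = (m.getD i []).length
def pvFc (v : List (List Bool)) : Nat := (v.map (fun row => row.countP (fun b => !b))).sum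

def pvInv (v : List (List Bool)) (s : PySem.Set (Int × Int)) : Prop :=
  ∀ p : Int × Int, PySem.Set.contains s p = pvVget v p.1 p.2

theorem init_row (m : List (List String)) (i : Nat) :
    (pvInitVisited m).getD i [] = (m.getD i []).map (fun _ => false) := by
  simp only [pvInitVisited, List.getD, List.getElem?_map]
  cases m[i]? <;> simp

theorem pvShape_init (m : List (List String)) : pvShape m (pvInitVisited m) := by
  refine ⟨?_, fun i => ?_⟩
  · unfold pvInitVisited
    exact List.length_map ..
  · rw [init_row]
    exact List.length_map ..

theorem pvVget_init (m : List (List String)) (r c : Int) : pvVget (pvInitVisited m) r c = false := by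
  unfold pvVget
  split
  · rw [init_row]
    simp only [List.getD, List.getElem?_map]
    cases h : (m[r.toNat]?.getD [])[c.toNat]? <;> simp [h]
  · rfl

theorem pvShape_cons (m : List (List String)) (v : List (List Bool)) (rm : List String) (rv : List Bool)
    (h : pvShape (rm :: m) (rv :: v)) : rv.length = rm.length ∧ pvShape m v := by
  obtain ⟨hl, hr⟩ := h
  exact ⟨hr 0, by simpa using hl, fun i => hr (i+1)⟩

theorem pvFc_le (m : List (List String)) (v : List (List Bool)) (h : pvShape m v) : pvFc v ≤ pvSize m := by
  induction v generalizing m with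
  | nil => simp [pvFc]
  | cons rv v ih =>
    cases m with
    | nil => exact absurd h.1 (by simp)
    | cons rm m =>
      obtain ⟨h0, hs⟩ := pvShape_cons _ _ _ _ h
      simp only [pvFc, pvSize, List.map_cons, List.sum_cons]
      have h1 := ih m hs
      have hcount : rv.countP (fun b => !b) ≤ rm.length := by
        rw [← h0]; exact List.countP_le_length ..
      simp only [pvFc, pvSize] at h1
      omega

theorem pvShape_vset (m : List (List String)) (v : List (List Bool)) (r c : Int)
    (h : pvShape m v) : pvShape m (pvVset v r c) := by
  obtain ⟨hl, hr⟩ := h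
  refine ⟨by simpa [pvVset] using hl, fun i => ?_⟩
  rw [← hr i]
  simp only [pvVset, List.getD, List.getElem?_modify]
  cases hv : v[i]? with
  | none => simp
  | some row => by_cases hi : r.toNat = i <;> simp [hi]

theorem pvVget_vset (v : List (List Bool)) (row col r c : Int)
    (hr0 : 0 ≤ row) (hc0 : 0 ≤ col)
    (hr : row.toNat < v.length) (hc : col.toNat < (v.getD row.toNat []).length) :
    pvVget (pvVset v row col) r c = if r = row ∧ c = col then true else pvVget v r c := by
  by_cases hrc : 0 ≤ r ∧ 0 ≤ c
  · have hrow : v[row.toNat]? = some (v.getD row.toNat []) := by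
      rw [List.getD_eq_getElem _ _ hr]; exact List.getElem?_eq_getElem hr
    simp only [pvVget, pvVset, hrc, if_true, List.getD, List.getElem?_modify]
    by_cases hrr : r = row
    · subst hrr
      simp only [if_pos rfl, hrow]
      by_cases hcc : c = col
      · subst hcc
        have hc' : c.toNat < (v[r.toNat]?.getD []).length := hc
        simp [List.getElem?_set, hc']
      · have : c.toNat ≠ col.toNat := by omega
        simp [List.getElem?_set, this, Ne.symm this, hcc]
    · have : row.toNat ≠ r.toNat := by omega
      simp only [if_neg this, hrr, false_and, if_false]
      cases v[r.toNat]? <;> simp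
  · have : ¬ (r = row ∧ c = col) := by
      rintro ⟨rfl, rfl⟩; exact hrc ⟨hr0, hc0⟩
    simp [pvVget, hrc, this]

theorem countP_set_true (row : List Bool) (c : Nat) (hc : c < row.length) (hf : row[c] = false) :
    (row.set c true).countP (fun b => !b) + 1 = row.countP (fun b => !b) := by
  induction row generalizing c with
  | nil => simp at hc
  | cons b row ih =>
    cases c with
    | zero => simp_all [List.countP_cons]
    | succ c =>
      simp only [List.set_cons_succ, List.countP_cons]
      have := ih c (by simpa using hc) (by simpa using hf)
      omega

theorem pvFc_set (v : List (List Bool)) (i : Nat) (a : List Bool) (hi : i < v.length) :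
    pvFc (v.set i a) + (v[i]).countP (fun b => !b) = pvFc v + a.countP (fun b => !b) := by
  induction v generalizing i with
  | nil => simp at hi
  | cons rv v ih =>
    cases i with
    | zero => simp [pvFc]; omega
    | succ i =>
      simp only [List.set_cons_succ, pvFc, List.map_cons, List.sum_cons, List.getElem_cons_succ]
      have := ih i (by simpa using hi)
      simp only [pvFc] at this
      omega

theorem pvFc_vset (v : List (List Bool)) (row col : Int)
    (hr0 : 0 ≤ row) (hc0 : 0 ≤ col)
    (hr : row.toNat < v.length) (hc : col.toNat < (v.getD row.toNat []).length)
    (hfalse : pvVget v row col = false) :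
    pvFc (pvVset v row col) + 1 = pvFc v := by
  have hrowD : v.getD row.toNat [] = v[row.toNat] := List.getD_eq_getElem _ _ hr
  rw [hrowD] at hc
  have hcell : (v[row.toNat])[col.toNat] = false := by
    unfold pvVget at hfalse
    rw [if_pos (And.intro hr0 hc0), hrowD, List.getD_eq_getElem _ _ hc] at hfalse
    exact hfalse
  have hmod : pvVset v row col = v.set row.toNat ((v[row.toNat]).set col.toNat true) := by
    simpa [pvVset] using List.modify_eq_set_get (fun row => row.set col.toNat true) hr
  have h1 := pvFc_set v row.toNat ((v[row.toNat]).set col.toNat true) hr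
  have h2 := countP_set_true (v[row.toNat]) col.toNat hc hcell
  rw [hmod]
  omega

def pvFrames (row col : Int) (dt : String) (ds : List (String × (Int × Int × String))) : List (Int × Int × String) :=
  ds.flatMap (fun d => if dt ≠ d.2.2.2 then [(row + d.2.1, col + d.2.2.1, d.1)] else [])

theorem pvPush_eq (row col : Int) (dt : String) (st : List (Int × Int × String)) :
    pvPush row col dt st = pvFrames row col dt pvDirs ++ st := by
  simp only [pvPush, pvDirsRev, pvFrames, pvDirs, List.foldl, List.flatMap_cons, List.flatMap_nil]
  split_ifs <;> simp

theorem pvFrames_cons (row col : Int) (dt : String) (d : String × (Int × Int × String))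
    (ds : List (String × (Int × Int × String))) :
    pvFrames row col dt (d :: ds)
      = (if dt ≠ d.2.2.2 then [(row + d.2.1, col + d.2.2.1, d.1)] else []) ++ pvFrames row col dt ds := by
  simp [pvFrames]

theorem dfsA_pres (m : List (List String)) :
    ∀ (fuel : Nat) (v : List (List Bool)) (row col : Int) (ch dt : String), pvShape m v →
      pvShape m (dfsA m fuel v row col ch dt).1 ∧ pvFc (dfsA m fuel v row col ch dt).1 ≤ pvFc v := by
  intro fuel
  induction fuel with
  | zero => intro v row col ch dt hs; exact ⟨hs, le_refl _⟩
  | succ fuel ih =>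
    intro v row col ch dt hs
    rw [dfsA]
    split
    · exact ⟨hs, le_refl _⟩
    split
    · exact ⟨hs, le_refl _⟩
    split
    · exact ⟨hs, le_refl _⟩
    split
    · exact ⟨hs, le_refl _⟩
    rename_i hr hc hch hvis
    have hr0 : 0 ≤ row := by omega
    have hc0 : 0 ≤ col := by omega
    have hrn : row.toNat < v.length := by
      have := hs.1; omega
    have hcn : col.toNat < (v.getD row.toNat []).length := by
      have := hs.2 row.toNat; omega
    have hvset : pvShape m (pvVset v row col) := pvShape_vset m v row col hs
    have hfc : pvFc (pvVset v row col) + 1 = pvFc v :=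
      pvFc_vset v row col hr0 hc0 hrn hcn (by simpa using hvis)
    have inner : ∀ (ds : List (String × (Int × Int × String))) (acc : List (List Bool) × Bool),
        pvShape m acc.1 →
        pvShape m (ds.foldl (fun acc d =>
          if dt ≠ d.2.2.2 then
            let r := dfsA m fuel acc.1 (row + d.2.1) (col + d.2.2.1) ch d.1
            (r.1, acc.2 || r.2)
          else acc) acc).1
        ∧ pvFc (ds.foldl (fun acc d =>
          if dt ≠ d.2.2.2 then
            let r := dfsA m fuel acc.1 (row + d.2.1) (col + d.2.2.1) ch d.1
            (r.1, acc.2 || r.2)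
          else acc) acc).1 ≤ pvFc acc.1 := by
      intro ds
      induction ds with
      | nil => exact fun acc h => ⟨h, le_refl _⟩
      | cons d ds ihd =>
        intro acc h
        simp only [List.foldl_cons]
        split
        · have h1 := ih acc.1 (row + d.2.1) (col + d.2.2.1) ch d.1 h
          have h2 := ihd (((dfsA m fuel acc.1 (row + d.2.1) (col + d.2.2.1) ch d.1).1,
            acc.2 || (dfsA m fuel acc.1 (row + d.2.1) (col + d.2.2.1) ch d.1).2)) h1.1
          exact ⟨h2.1, le_trans h2.2 h1.2⟩
        · exact ihd acc h
    have hres := inner pvDirs (pvVset v row col, false) hvset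
    have hfst : (pvVset v row col, (false : Bool)).1 = pvVset v row col := rfl
    rw [hfst] at hres
    exact ⟨hres.1, by omega⟩

theorem foldl_true (m : List (List String)) (fuel : Nat) (row col : Int) (ch dt : String) :
    ∀ (ds : List (String × (Int × Int × String))) (v : List (List Bool)),
      ((ds.foldl (fun acc d =>
          if dt ≠ d.2.2.2 then
            let r := dfsA m fuel acc.1 (row + d.2.1) (col + d.2.2.1) ch d.1
            (r.1, acc.2 || r.2)
          else acc) (v, true)).2 : Bool) = true := by
  intro ds
  induction ds with
  | nil => intro v; rfl
  | cons d ds ihd =>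
    intro v
    simp only [List.foldl_cons]
    split
    · simpa using ihd (dfsA m fuel v (row + d.2.1) (col + d.2.2.1) ch d.1).1
    · exact ihd v

theorem pvInv_add (v : List (List Bool)) (s : PySem.Set (Int × Int)) (row col : Int)
    (hr0 : 0 ≤ row) (hc0 : 0 ≤ col)
    (hrn : row.toNat < v.length) (hcn : col.toNat < (v.getD row.toNat []).length)
    (hinv : pvInv v s) :
    pvInv (pvVset v row col) (PySem.Set.add s (row, col)) := by
  intro p
  rw [pvVget_vset v row col p.1 p.2 hr0 hc0 hrn hcn]
  by_cases hp : p = (row, col)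
  · subst hp
    have hmem : ((row, col) : Int × Int) ∈ PySem.Set.add s (row, col) :=
      (PySem.Set.mem_add s _ _).2 (Or.inr rfl)
    rw [(PySem.Set.contains_iff _ _).2 hmem, if_pos ⟨rfl, rfl⟩]
  · have hcond : ¬ (p.1 = row ∧ p.2 = col) := by
      intro ⟨ha, hb⟩; exact hp (Prod.ext_iff.2 ⟨ha, hb⟩)
    rw [if_neg hcond, ← hinv p]
    cases hc : PySem.Set.contains s p
    · cases hc2 : PySem.Set.contains (PySem.Set.add s (row, col)) p
      · rfl
      · exfalso
        rcases (PySem.Set.mem_add s (row, col) p).1 ((PySem.Set.contains_iff _ _).1 hc2) with hm | he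
        · rw [(PySem.Set.contains_iff _ _).2 hm] at hc; simp at hc
        · exact hp he
    · have hmem : p ∈ PySem.Set.add s (row, col) :=
        (PySem.Set.mem_add s (row, col) p).2 (Or.inl ((PySem.Set.contains_iff _ _).1 hc))
      rw [(PySem.Set.contains_iff _ _).2 hmem]

-- main simulation: one frame of A's recursive DFS against B's stack loop
theorem pvSim (m : List (List String)) (ch : String) :
    ∀ (fuel : Nat) (v : List (List Bool)) (s : PySem.Set (Int × Int)) (row col : Int)
      (dt : String) (st : List (Int × Int × String)),
      pvShape m v → pvInv v s → pvFc v < fuel →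
      ((dfsA m fuel v row col ch dt).2 = true →
          pvStackB m ch s ((row, col, dt) :: st) = none)
      ∧ ((dfsA m fuel v row col ch dt).2 = false →
          ∃ s', pvInv (dfsA m fuel v row col ch dt).1 s' ∧
            pvStackB m ch s ((row, col, dt) :: st) = pvStackB m ch s' st) := by
  intro fuel
  induction fuel with
  | zero => intro v s row col dt st hs hinv hfc; exact absurd hfc (Nat.not_lt_zero _)
  | succ fuel IH =>
    intro v s row col dt st hs hinv hfc
    rw [dfsA, pvStackB]
    by_cases h1 : row < 0 ∨ ((m.length : Nat) : Int) ≤ row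
    · simp only [if_pos h1]
      exact ⟨fun h => by simp at h, fun _ => ⟨s, hinv, rfl⟩⟩
    simp only [if_neg h1]
    by_cases h2 : col < 0 ∨ (((m.getD row.toNat []).length : Nat) : Int) ≤ col
    · simp only [if_pos h2]
      exact ⟨fun h => by simp at h, fun _ => ⟨s, hinv, rfl⟩⟩
    simp only [if_neg h2]
    by_cases h3 : ((m.getD row.toNat []).getD col.toNat "") ≠ ch
    · simp only [if_pos h3]
      exact ⟨fun h => by simp at h, fun _ => ⟨s, hinv, rfl⟩⟩
    simp only [if_neg h3]
    have hr0 : 0 ≤ row := by omega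
    have hc0 : 0 ≤ col := by omega
    have hrn : row.toNat < v.length := by have := hs.1; omega
    have hcn : col.toNat < (v.getD row.toNat []).length := by have := hs.2 row.toNat; omega
    by_cases h4 : pvVget v row col = true
    · simp only [if_pos h4, hinv (row, col)]
      exact ⟨fun _ => by simp [h4], fun h => by simp at h⟩
    · have h4' : pvVget v row col = false := by cases h : pvVget v row col; rfl; exact absurd h h4
      simp only [if_neg h4, hinv (row, col), h4', Bool.false_eq_true, if_neg (by simp : ¬ (false = true))]
      have hvset : pvShape m (pvVset v row col) := pvShape_vset m v row col hs
      have hfc0 : pvFc (pvVset v row col) < fuel := by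
        have := pvFc_vset v row col hr0 hc0 hrn hcn h4'
        omega
      have hinv0 : pvInv (pvVset v row col) (PySem.Set.add s (row, col)) :=
        pvInv_add v s row col hr0 hc0 hrn hcn hinv
      rw [pvPush_eq]
      have chain : ∀ (ds : List (String × (Int × Int × String))) (v : List (List Bool))
          (s : PySem.Set (Int × Int)) (st' : List (Int × Int × String)),
          pvShape m v → pvInv v s → pvFc v < fuel →
          (((ds.foldl (fun acc d =>
              if dt ≠ d.2.2.2 then
                let r := dfsA m fuel acc.1 (row + d.2.1) (col + d.2.2.1) ch d.1
                (r.1, acc.2 || r.2)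
              else acc) (v, false)).2 = true →
              pvStackB m ch s (pvFrames row col dt ds ++ st') = none)
           ∧ ((ds.foldl (fun acc d =>
              if dt ≠ d.2.2.2 then
                let r := dfsA m fuel acc.1 (row + d.2.1) (col + d.2.2.1) ch d.1
                (r.1, acc.2 || r.2)
              else acc) (v, false)).2 = false →
              ∃ s', pvInv (ds.foldl (fun acc d =>
                if dt ≠ d.2.2.2 then
                  let r := dfsA m fuel acc.1 (row + d.2.1) (col + d.2.2.1) ch d.1
                  (r.1, acc.2 || r.2)
                else acc) (v, false)).1 s' ∧
                pvStackB m ch s (pvFrames row col dt ds ++ st') = pvStackB m ch s' st')) := by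
        intro ds
        induction ds with
        | nil =>
          intro v s st' hs' hinv' hfc'
          exact ⟨fun h => by simp at h, fun _ => ⟨s, hinv', rfl⟩⟩
        | cons d ds ihd =>
          intro v s st' hs' hinv' hfc'
          rw [pvFrames_cons]
          simp only [List.foldl_cons]
          by_cases hd : dt ≠ d.2.2.2
          · simp only [if_pos hd, List.append_assoc, List.singleton_append, List.cons_append, List.nil_append]
            have hsing := IH v s (row + d.2.1) (col + d.2.2.1) d.1
              (pvFrames row col dt ds ++ st') hs' hinv' hfc'
            cases hb : (dfsA m fuel v (row + d.2.1) (col + d.2.2.1) ch d.1).2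
            · obtain ⟨s1, hinv1, heq⟩ := hsing.2 hb
              have hpres := dfsA_pres m fuel v (row + d.2.1) (col + d.2.2.1) ch d.1 hs'
              have hrest := ihd (dfsA m fuel v (row + d.2.1) (col + d.2.2.1) ch d.1).1 s1 st'
                hpres.1 hinv1 (lt_of_le_of_lt hpres.2 hfc')
              simp only [hb, Bool.or_false]
              rw [heq]
              exact hrest
            · have htrue := foldl_true m fuel row col ch dt ds
                (dfsA m fuel v (row + d.2.1) (col + d.2.2.1) ch d.1).1
              simp only [hb, Bool.or_true]
              rw [hsing.1 hb]
              exact ⟨fun _ => rfl, fun h => by rw [htrue] at h; simp at h⟩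
          · simp only [if_neg hd, List.nil_append]
            exact ihd v s st' hs' hinv' hfc'
      exact chain pvDirs (pvVset v row col) (PySem.Set.add s (row, col)) st hvset hinv0 hfc0

theorem pvColsEq (m : List (List String)) (row : Nat) :
    ∀ (cs : List Nat) (v : List (List Bool)) (s : PySem.Set (Int × Int)),
      pvShape m v → pvInv v s →
      (pvColsA m row v cs).2 = (pvColsB m row s cs).2
      ∧ ((pvColsA m row v cs).2 = false →
          pvShape m (pvColsA m row v cs).1 ∧ pvInv (pvColsA m row v cs).1 (pvColsB m row s cs).1) := by
  intro cs
  induction cs with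
  | nil => intro v s hs hinv; exact ⟨rfl, fun _ => ⟨hs, hinv⟩⟩
  | cons c cs ih =>
    intro v s hs hinv
    rw [pvColsA, pvColsB]
    rw [hinv ((row : Int), (c : Int))]
    cases hvg : pvVget v (row : Int) (c : Int)
    · simp only [Bool.not_false, if_pos rfl, if_neg (by simp : ¬ ((false : Bool) = true))]
      have hsim := pvSim m ((m.getD row []).getD c "") (pvSize m + 1) v s (row : Int) (c : Int) "o" []
        hs hinv (Nat.lt_succ_of_le (pvFc_le m v hs))
      cases hp2 : (dfsA m (pvSize m + 1) v (row : Int) (c : Int) ((m.getD row []).getD c "") "o").2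
      · obtain ⟨s', hinv', heq⟩ := hsim.2 hp2
        have hsome : pvStackB m ((m.getD row []).getD c "") s' [] = some s' := by
          rw [pvStackB]
        rw [heq, hsome]
        simp only [hp2, Bool.false_eq_true, if_neg (by simp : ¬ ((false : Bool) = true))]
        have hpres := dfsA_pres m (pvSize m + 1) v (row : Int) (c : Int) ((m.getD row []).getD c "") "o" hs
        exact ih _ s' hpres.1 hinv'
      · rw [hsim.1 hp2]
        simp only [hp2, if_pos rfl]
        exact ⟨rfl, fun h => by simp at h⟩
    · simp only [Bool.not_true, if_neg (by simp : ¬ ((false : Bool) = true)), if_pos rfl]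
      exact ih v s hs hinv

theorem pvRowsEq (m : List (List String)) :
    ∀ (rs : List Nat) (v : List (List Bool)) (s : PySem.Set (Int × Int)),
      pvShape m v → pvInv v s →
      (pvRowsA m v rs).2 = (pvRowsB m s rs).2 := by
  intro rs
  induction rs with
  | nil => intro v s _ _; rfl
  | cons r rs ih =>
    intro v s hs hinv
    rw [pvRowsA, pvRowsB]
    have hc := pvColsEq m r (List.range ((m.getD r []).length)) v s hs hinv
    cases hb : (pvColsA m r v (List.range ((m.getD r []).length))).2
    · rw [← hc.1, hb]
      simp only [Bool.false_eq_true, if_neg (by simp : ¬ ((false : Bool) = true))]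
      obtain ⟨hs', hinv'⟩ := hc.2 hb
      exact ih _ _ hs' hinv'
    · rw [← hc.1, hb]
      simp

-- ===== VERDICT (by name: the statement is the Claim_ definition above) =====
theorem cycle_in_matrix_spec : Claim_equal_cycle_in_matrix := by
  intro m _
  unfold Spec_cycle_in_matrix cycle_in_matrix cycle_in_matrix_alt
  exact pvRowsEq m (List.range m.length) (pvInitVisited m) PySem.Set.empty
    (pvShape_init m) (fun p => by rw [pvVget_init]; rfl)
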